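-- pv_equiv track=rewrite | github.com/pbrehaut/FW_Forms_pub | helpers.py | get_topology_single
-- ===== SOURCE A (Python) =====
-- def get_topology_single(result_list):
--     extracted_values = set()
--     for item in result_list[2]:
--         # Get the third element of each tuple (the string with format like '1:COR:FW1, flow 1')
--         field_string = item
--
--         # Split by ':' and get the second element
--         fields = field_string.split(':')
--         if len(fields) >= 2:
--             extracted_values.add(fields[1])
--
--     if len(extracted_values) == 1:
--         return extracted_values.pop()
--     else:
--         return None
-- ===== SOURCE B (Python) =====
-- def get_topology_single(result_list):
--     # Single-candidate all-equal scan with short-circuit instead of building a set.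
--     candidate = None
--     seen = False
--     for item in result_list[2]:
--         fields = item.split(':')
--         if len(fields) >= 2:
--             value = fields[1]
--             if not seen:
--                 candidate = value
--                 seen = True
--             elif candidate != value:
--                 return None
--     return candidate if seen else None
-- ===== Notes on version B (the rewrite author's own statement) =====
-- stated objective: alternative
-- what changed: Replaces set accumulation followed by a size-1 check with a single-candidate all-equal scan over result_list[2] that records the first extracted value and short-circuits to None on the first differing one.
import Mathlib
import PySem

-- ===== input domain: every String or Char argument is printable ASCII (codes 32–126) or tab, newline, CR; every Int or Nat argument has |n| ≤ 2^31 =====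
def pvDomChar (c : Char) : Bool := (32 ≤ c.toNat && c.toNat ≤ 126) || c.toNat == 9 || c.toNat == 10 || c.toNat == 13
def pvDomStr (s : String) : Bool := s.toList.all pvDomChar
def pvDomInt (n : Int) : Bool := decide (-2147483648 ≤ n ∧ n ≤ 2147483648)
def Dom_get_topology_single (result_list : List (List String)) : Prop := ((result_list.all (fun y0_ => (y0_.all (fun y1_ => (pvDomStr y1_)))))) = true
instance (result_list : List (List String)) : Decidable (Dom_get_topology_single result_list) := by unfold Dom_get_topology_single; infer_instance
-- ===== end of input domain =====

-- B replaces A's set-accumulation-then-size-check with a single-candidate all-equal scan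
-- that short-circuits to None on the first differing value (objective: alternative).

-- ===== PORT A =====
-- one loop step of A: add fields[1] to the set when the split has at least 2 fields
def pvStepA (s : PySem.Set String) (item : String) : PySem.Set String :=
  if 2 ≤ ((PySem.Str.split? item ":").getD []).length then
    PySem.Set.add s (((PySem.Str.split? item ":").getD []).getD 1 "")
  else s

def get_topology_single (result_list : List (List String)) : Option String :=
  match PySem.List.pyGet? result_list 2 with
  | none => none   -- Python raises IndexError here; excluded by Pre_
  | some items =>
    let extracted := items.foldl pvStepA PySem.Set.empty
    if extracted.length == 1 then extracted.head? else none

-- ===== PORT B =====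
-- B's loop: candidate-so-far (none = nothing seen yet); early return none on mismatch
def pvLoopB (items : List String) (cand : Option String) : Option String :=
  match items with
  | [] => cand
  | item :: rest =>
    if 2 ≤ ((PySem.Str.split? item ":").getD []).length then
      match cand with
      | none => pvLoopB rest (some (((PySem.Str.split? item ":").getD []).getD 1 ""))
      | some c =>
        if c == ((PySem.Str.split? item ":").getD []).getD 1 "" then pvLoopB rest cand
        else none
    else pvLoopB rest cand

def get_topology_single_alt (result_list : List (List String)) : Option String :=
  match PySem.List.pyGet? result_list 2 with
  | none => none   -- same IndexError site as A; excluded by Pre_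
  | some items => pvLoopB items none

-- ===== PRECONDITION & SPEC =====
-- A evaluates result_list[2]: it raises IndexError unless the list has at least 3 elements.
def Pre_get_topology_single (result_list : List (List String)) : Prop :=
  3 ≤ result_list.length
instance (result_list : List (List String)) : Decidable (Pre_get_topology_single result_list) := by
  unfold Pre_get_topology_single; infer_instance

def pvWitness_get_topology_single : List (List String) :=
  [[], [], ["1:COR:FW1, flow 1", "2:COR:FW2, flow 2"]]

def Spec_get_topology_single (result_list : List (List String)) (out : Option String) : Prop := out = get_topology_single_alt result_list
instance (result_list : List (List String)) (out : Option String) : Decidable (Spec_get_topology_single result_list out) := by unfold Spec_get_topology_single; infer_instance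

-- ===== CLAIM (what is proved, stated in full; the proofs are below) =====
def Claim_equal_get_topology_single : Prop := ∀ (result_list : List (List String)), Dom_get_topology_single result_list → Pre_get_topology_single result_list → Spec_get_topology_single result_list (get_topology_single result_list)

-- ===== LEMMAS AND PROOFS =====

lemma pvAdd_nil (v : String) : PySem.Set.add ([] : PySem.Set String) v = [v] := by
  simp [PySem.Set.add, PySem.Set.contains]

lemma pvAdd_single_self (c v : String) (h : c = v) : PySem.Set.add [c] v = [c] := by
  simp [PySem.Set.add, PySem.Set.contains, h]

lemma pvAdd_single_ne (c v : String) (h : ¬ c = v) : PySem.Set.add [c] v = [c, v] := by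
  simp [PySem.Set.add, PySem.Set.contains, Ne.symm h]

-- once the set has ≥ 2 elements it keeps ≥ 2 elements
lemma pvFoldA_ge_two (items : List String) (s : PySem.Set String)
    (h : 2 ≤ s.length) : 2 ≤ (items.foldl pvStepA s).length := by
  induction items generalizing s with
  | nil => simpa using h
  | cons item rest ih =>
    have hadd : ∀ (v : String), 2 ≤ (PySem.Set.add s v).length := by
      intro v
      unfold PySem.Set.add
      split_ifs
      · exact h
      · simp; omega
    simp only [List.foldl_cons, pvStepA]
    split_ifs with hft
    · exact ih _ (hadd _)
    · exact ih _ h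

-- loop correspondence: B's candidate state mirrors A's set while the set has ≤ 1 element
lemma pvLoop_eq (items : List String) (s : PySem.Set String) (h : s.length ≤ 1) :
    (if (items.foldl pvStepA s).length == 1 then (items.foldl pvStepA s).head? else none)
      = pvLoopB items s.head? := by
  induction items generalizing s with
  | nil =>
    match s, h with
    | [], _ => simp [pvLoopB]
    | [c], _ => simp [pvLoopB]
  | cons item rest ih =>
    simp only [List.foldl_cons, pvStepA, pvLoopB]
    by_cases hf : 2 ≤ ((PySem.Str.split? item ":").getD []).length
    · rw [if_pos hf, if_pos hf]
      match s, h with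
      | [], _ =>
        simp only [List.head?_nil]
        rw [pvAdd_nil]
        exact ih _ (by simp)
      | [c], _ =>
        simp only [List.head?_cons]
        by_cases hc : c = ((PySem.Str.split? item ":").getD []).getD 1 ""
        · rw [pvAdd_single_self _ _ hc, if_pos (beq_iff_eq.mpr hc)]
          exact ih [c] (by simp)
        · rw [pvAdd_single_ne _ _ hc,
              if_neg (show ¬ (c == ((PySem.Str.split? item ":").getD []).getD 1 "") = true from
                fun hb => hc (beq_iff_eq.mp hb))]
          have h2 : 2 ≤ (rest.foldl pvStepA
              [c, ((PySem.Str.split? item ":").getD []).getD 1 ""]).length :=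
            pvFoldA_ge_two rest _ (by simp)
          rw [if_neg (by simp only [beq_iff_eq]; omega)]
    · rw [if_neg hf, if_neg hf]
      exact ih s h

-- ===== VERDICT (by name: the statement is the Claim_ definition above) =====
theorem get_topology_single_spec : Claim_equal_get_topology_single := by
  intro result_list _ hpre
  unfold Pre_get_topology_single at hpre
  unfold Spec_get_topology_single get_topology_single get_topology_single_alt
  match result_list, hpre with
  | a :: b :: c :: rest, _ =>
    have hget : PySem.List.pyGet? (a :: b :: c :: rest) (2 : Int) = some c := by
      simp only [PySem.List.pyGet?, PySem.List.pyIdx?]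
      rw [if_pos (show (0:Int) ≤ 2 by norm_num),
          if_pos (show (2:Int) < ((a :: b :: c :: rest).length : Int) by
            simp only [List.length_cons]; push_cast; omega)]
      rfl
    rw [hget]
    exact pvLoop_eq c PySem.Set.empty (by simp [PySem.Set.empty])
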